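-- pv_equiv track=rewrite | github.com/vipinsaini27/DSAlgo | Day 74 - Intro to Dynamic Programming (1D DP)/Maximum Sum.py | solve
-- ===== SOURCE A (Python) =====
-- def solve(A, B, C, D):
--     dp = [[], [], []]
--     dp[0].append(A[0]*B)
--     dp[1].append(dp[0][-1] + A[0]*C)
--     dp[2].append(dp[1][-1] + A[0]*D)
--
--     i = 1
--     while i < len(A):
--         val = A[i]
--         if val*B > dp[0][-1]:
--             dp[0].append(val*B)
--         else:
--             dp[0].append(dp[0][-1])
--
--         if (val*C + dp[0][-1]) > dp[1][-1]:
--             dp[1].append(val*C + dp[0][-1])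
--         else:
--             dp[1].append(dp[1][-1])
--
--         if (val*D + dp[1][-1]) > dp[2][-1]:
--             dp[2].append(val*D + dp[1][-1])
--         else:
--             dp[2].append(dp[2][-1])
--
--         i += 1
--
--
--     return dp[2][-1]
-- ===== SOURCE B (Python) =====
-- def solve(A, B, C, D):
--     def prefix_max(xs):
--         out = []
--         m = xs[0]
--         for x in xs:
--             if x > m:
--                 m = x
--             out.append(m)
--         return out
--
--     p0 = prefix_max([a * B for a in A])
--     p1 = prefix_max([a * C + p0[i] for i, a in enumerate(A)])
--     p2 = prefix_max([a * D + p1[i] for i, a in enumerate(A)])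
--     return p2[-1]
-- ===== Notes on version B (the rewrite author's own statement) =====
-- stated objective: simpler
-- what changed: Replaces the single fused while-loop appending to three interleaved dp lists by three independent prefix-maximum passes (p0 over A[i]*B, p1 over A[i]*C+p0[i], p2 over A[i]*D+p1[i]) and returns p2[-1].
import Mathlib
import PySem

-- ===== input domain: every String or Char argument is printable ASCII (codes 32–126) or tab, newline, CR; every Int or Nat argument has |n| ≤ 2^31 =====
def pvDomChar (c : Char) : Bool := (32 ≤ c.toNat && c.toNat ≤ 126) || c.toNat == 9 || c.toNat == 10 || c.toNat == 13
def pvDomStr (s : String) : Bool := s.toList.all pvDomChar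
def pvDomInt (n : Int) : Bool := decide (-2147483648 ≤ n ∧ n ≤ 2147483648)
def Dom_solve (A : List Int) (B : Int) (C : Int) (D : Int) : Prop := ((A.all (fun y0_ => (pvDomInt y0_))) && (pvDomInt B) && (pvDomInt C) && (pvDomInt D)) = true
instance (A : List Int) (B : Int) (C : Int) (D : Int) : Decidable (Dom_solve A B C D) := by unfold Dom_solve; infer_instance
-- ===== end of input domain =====

-- B replaces A's single fused loop over three interleaved dp lists by three independent
-- prefix-maximum passes (objective: simpler).

-- ===== PORT A =====
-- dp[k][-1] on the (always nonempty) dp lists: pyGet? dp (-1) with default 0 (never used).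
def pyLast (l : List Int) : Int := (PySem.List.pyGet? l (-1)).getD 0

-- literal transliteration of A: the while-loop over i = 1 .. len(A)-1 is a foldl over A's tail,
-- the state being the three dp lists, appended to exactly as Python does.
def solve (A : List Int) (B : Int) (C : Int) (D : Int) : Int :=
  match A with
  | [] => 0   -- Python raises IndexError at A[0]; excluded by Pre_solve
  | a0 :: rest =>
    let dp0 : List Int := [a0 * B]
    let dp1 : List Int := [pyLast dp0 + a0 * C]
    let dp2 : List Int := [pyLast dp1 + a0 * D]
    let s := rest.foldl (fun (s : List Int × List Int × List Int) val =>
      let dp0 := s.1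
      let dp1 := s.2.1
      let dp2 := s.2.2
      let dp0 := if val * B > pyLast dp0 then dp0 ++ [val * B] else dp0 ++ [pyLast dp0]
      let dp1 := if val * C + pyLast dp0 > pyLast dp1 then dp1 ++ [val * C + pyLast dp0] else dp1 ++ [pyLast dp1]
      let dp2 := if val * D + pyLast dp1 > pyLast dp2 then dp2 ++ [val * D + pyLast dp1] else dp2 ++ [pyLast dp2]
      (dp0, dp1, dp2)) (dp0, dp1, dp2)
    pyLast s.2.2

-- ===== PORT B =====
-- transliteration of Source B's prefix_max loop: running max m, output built element by element
def prefixMaxGo (m : Int) : List Int → List Int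
  | [] => []
  | x :: xs => let m' := if x > m then x else m; m' :: prefixMaxGo m' xs

def prefixMax (xs : List Int) : List Int :=
  match xs with
  | [] => []            -- Python raises at xs[0]; unreachable under Pre_solve
  | x0 :: _ => prefixMaxGo x0 xs

def solve_alt (A : List Int) (B : Int) (C : Int) (D : Int) : Int :=
  let p0 := prefixMax (A.map (fun a => a * B))
  let p1 := prefixMax (List.zipWith (fun a p => a * C + p) A p0)
  let p2 := prefixMax (List.zipWith (fun a p => a * D + p) A p1)
  (PySem.List.pyGet? p2 (-1)).getD 0

-- ===== PRECONDITION & SPEC =====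
-- A evaluates A[0] and raises IndexError on the empty list; Pre_ excludes exactly that.
def Pre_solve (A : List Int) (B : Int) (C : Int) (D : Int) : Prop := A ≠ []
instance (A : List Int) (B : Int) (C : Int) (D : Int) : Decidable (Pre_solve A B C D) := by unfold Pre_solve; infer_instance
def pvWitness_solve : List Int × Int × Int × Int := ([1, -2, 3], 2, -1, 3)

def Spec_solve (A : List Int) (B : Int) (C : Int) (D : Int) (out : Int) : Prop := out = solve_alt A B C D
instance (A : List Int) (B : Int) (C : Int) (D : Int) (out : Int) : Decidable (Spec_solve A B C D out) := by unfold Spec_solve; infer_instance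

-- ===== CLAIM (what is proved, stated in full; the proofs are below) =====
def Claim_equal_solve : Prop := ∀ (A : List Int) (B : Int) (C : Int) (D : Int), Dom_solve A B C D → Pre_solve A B C D → Spec_solve A B C D (solve A B C D)

-- ===== LEMMAS AND PROOFS =====

-- the common fused step both programs compute, on the three running maxima
def step (B C D : Int) (s : Int × Int × Int) (v : Int) : Int × Int × Int :=
  let m0 := if v * B > s.1 then v * B else s.1
  let m1 := if v * C + m0 > s.2.1 then v * C + m0 else s.2.1
  let m2 := if v * D + m1 > s.2.2 then v * D + m1 else s.2.2
  (m0, m1, m2)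

theorem pyLast_append (l : List Int) (x : Int) : pyLast (l ++ [x]) = x := by
  simp [pyLast, PySem.List.pyGet?_neg_one_append_singleton]

theorem pyLast_singleton (x : Int) : pyLast [x] = x := by
  simpa using pyLast_append [] x

theorem pyLast_ite (c : Prop) [Decidable c] (l : List Int) (x y : Int) :
    pyLast (if c then l ++ [x] else l ++ [y]) = if c then x else y := by
  split_ifs <;> rw [pyLast_append]

-- A's fold over the three lists tracks only the last elements
theorem solve_fold (B C D : Int) (rest : List Int) :
    ∀ (dp0 dp1 dp2 : List Int) (m0 m1 m2 : Int),
      pyLast dp0 = m0 → pyLast dp1 = m1 → pyLast dp2 = m2 →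
      pyLast (rest.foldl (fun (s : List Int × List Int × List Int) val =>
        let dp0 := s.1
        let dp1 := s.2.1
        let dp2 := s.2.2
        let dp0 := if val * B > pyLast dp0 then dp0 ++ [val * B] else dp0 ++ [pyLast dp0]
        let dp1 := if val * C + pyLast dp0 > pyLast dp1 then dp1 ++ [val * C + pyLast dp0] else dp1 ++ [pyLast dp1]
        let dp2 := if val * D + pyLast dp1 > pyLast dp2 then dp2 ++ [val * D + pyLast dp1] else dp2 ++ [pyLast dp2]
        (dp0, dp1, dp2)) (dp0, dp1, dp2)).2.2
      = (rest.foldl (step B C D) (m0, m1, m2)).2.2 := by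
  induction rest with
  | nil => intro dp0 dp1 dp2 m0 m1 m2 h0 h1 h2; simpa using h2
  | cons v rest ih =>
    intro dp0 dp1 dp2 m0 m1 m2 h0 h1 h2
    simp only [List.foldl_cons]
    apply ih
    · simp only [h0, pyLast_ite]
    · simp only [h0, h1, pyLast_ite]
    · simp only [h0, h1, h2, pyLast_ite]

theorem solve_eq_fold (B C D : Int) (a0 : Int) (rest : List Int) :
    solve (a0 :: rest) B C D
      = (rest.foldl (step B C D) (a0 * B, a0 * B + a0 * C, a0 * B + a0 * C + a0 * D)).2.2 := by
  simp only [solve]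
  exact solve_fold B C D rest _ _ _ _ _ _
    (pyLast_singleton _)
    (by rw [pyLast_singleton]; rw [pyLast_singleton])
    (by rw [pyLast_singleton, pyLast_singleton]; rw [pyLast_singleton])

-- B's three nested prefix-max passes track the same fused fold
theorem alt_fold (B C D : Int) (rest : List Int) :
    ∀ (m0 m1 m2 : Int),
      ((prefixMaxGo m2 (List.zipWith (fun a p => a * D + p) rest
          (prefixMaxGo m1 (List.zipWith (fun a p => a * C + p) rest
            (prefixMaxGo m0 (rest.map (fun a => a * B))))))).getLastD m2)
      = (rest.foldl (step B C D) (m0, m1, m2)).2.2 := by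
  induction rest with
  | nil => intro m0 m1 m2; simp [prefixMaxGo]
  | cons v rest ih =>
    intro m0 m1 m2
    simp only [List.map_cons, prefixMaxGo, List.zipWith_cons_cons, List.foldl_cons, step,
      List.getLastD_cons]
    exact ih _ _ _

theorem getD_getLast?_cons (l : List Int) : ∀ (x : Int), ((x :: l).getLast?).getD 0 = l.getLastD x := by
  induction l with
  | nil => intro x; simp
  | cons a l ih => intro x; rw [List.getLast?_cons_cons, ih a, List.getLastD_cons]

theorem alt_eq_fold (B C D : Int) (a0 : Int) (rest : List Int) :
    solve_alt (a0 :: rest) B C D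
      = (rest.foldl (step B C D) (a0 * B, a0 * B + a0 * C, a0 * B + a0 * C + a0 * D)).2.2 := by
  simp only [solve_alt, List.map_cons, prefixMax, prefixMaxGo, List.zipWith_cons_cons,
    PySem.List.pyGet?_neg_one]
  simp only [if_neg (lt_irrefl (a0 * B)), if_neg (lt_irrefl (a0 * C + a0 * B)),
    if_neg (lt_irrefl (a0 * D + (a0 * C + a0 * B)))]
  rw [show a0 * C + a0 * B = a0 * B + a0 * C by ring,
      show a0 * D + (a0 * B + a0 * C) = a0 * B + a0 * C + a0 * D by ring]
  rw [getD_getLast?_cons]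
  exact alt_fold B C D rest _ _ _

-- ===== VERDICT (by name: the statement is the Claim_ definition above) =====
theorem solve_spec : Claim_equal_solve := by
  intro A B C D _ hpre
  match A with
  | [] => exact absurd rfl hpre
  | a0 :: rest =>
    show solve (a0 :: rest) B C D = solve_alt (a0 :: rest) B C D
    rw [solve_eq_fold, alt_eq_fold]
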